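-- pv_equiv track=rewrite | github.com/m-elegance/Algos | Modul_1/Lesson_1.3(binary_search)_KW/step1_problem4.py | min_left
-- ===== SOURCE A (Python) =====
-- def ok_left(arr, mid, left):
--     return arr[mid] >= left
--
-- def min_left(arr, left):
--     l = 0
--     r = len(arr) - 1
--     ans = 0
--     while l <= r:
--         mid = (l + r) // 2
--         if ok_left(arr, mid, left):
--             r = mid - 1
--             ans = mid
--         else:
--             l = mid + 1
--
--     return ans
-- ===== SOURCE B (Python) =====
-- def min_left(arr, left):
--     def search(l, r):
--         if l > r:
--             return None
--         mid = (l + r) // 2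
--         if arr[mid] >= left:
--             found = search(l, mid - 1)
--             return mid if found is None else found
--         return search(mid + 1, r)
--     res = search(0, len(arr) - 1)
--     return 0 if res is None else res
-- ===== Notes on version B (the rewrite author's own statement) =====
-- stated objective: alternative
-- what changed: Replaces the iterative accumulator-threading loop (l, r, ans mutated each step) with an Option-returning recursive binary search that combines results on the way back up (the first successful probe on the return path supplies the answer, with a default of 0 at the top).
import Mathlib
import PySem

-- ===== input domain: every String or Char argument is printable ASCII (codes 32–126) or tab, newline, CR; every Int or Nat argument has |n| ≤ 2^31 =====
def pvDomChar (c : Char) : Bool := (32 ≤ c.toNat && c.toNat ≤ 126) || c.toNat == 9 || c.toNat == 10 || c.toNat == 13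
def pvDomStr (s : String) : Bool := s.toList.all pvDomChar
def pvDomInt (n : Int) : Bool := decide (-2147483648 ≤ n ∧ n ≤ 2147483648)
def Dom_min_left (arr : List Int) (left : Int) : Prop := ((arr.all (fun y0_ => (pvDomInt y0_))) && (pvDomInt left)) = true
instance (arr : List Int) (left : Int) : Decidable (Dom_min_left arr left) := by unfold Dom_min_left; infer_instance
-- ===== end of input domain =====

-- B replaces A's iterative accumulator-threading loop with an Option-returning
-- recursive binary search that combines results on the way back up (objective: alternative).

-- ===== PORT A =====
-- arr[mid]: in the loop below mid always satisfies 0 ≤ mid < arr.length (proved in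
-- min_left_loop_eq_search), so the 'none' (IndexError) branch is unreachable from min_left.
def ok_left (arr : List Int) (mid : Int) (left : Int) : Bool :=
  match PySem.List.pyGet? arr mid with
  | some v => decide (v ≥ left)
  | none => false

def min_left_loop (arr : List Int) (left l r ans : Int) : Int :=
  if h : l ≤ r then
    let mid := PySem.Int.floordiv (l + r) 2
    if ok_left arr mid left then
      min_left_loop arr left l (mid - 1) mid
    else
      min_left_loop arr left (mid + 1) r ans
  else ans
termination_by (r + 1 - l).toNat
decreasing_by
  · have hb := PySem.Int.floordiv_two_mid_bounds h
    omega
  · have hb := PySem.Int.floordiv_two_mid_bounds h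
    omega

def min_left (arr : List Int) (left : Int) : Int :=
  min_left_loop arr left 0 ((arr.length : Int) - 1) 0

-- ===== PORT B =====
-- arr[mid]: as on the A side, mid is always in range when called from min_left_alt,
-- so the 'none' (IndexError) branch is unreachable from the entry point.
def min_left_search (arr : List Int) (left l r : Int) : Option Int :=
  if h : l ≤ r then
    let mid := PySem.Int.floordiv (l + r) 2
    match PySem.List.pyGet? arr mid with
    | some v =>
      if v ≥ left then
        match min_left_search arr left l (mid - 1) with
        | none => some mid
        | some found => some found
      else
        min_left_search arr left (mid + 1) r
    | none => min_left_search arr left (mid + 1) r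
  else none
termination_by (r + 1 - l).toNat
decreasing_by
  · have hb := PySem.Int.floordiv_two_mid_bounds h
    omega
  · have hb := PySem.Int.floordiv_two_mid_bounds h
    omega

def min_left_alt (arr : List Int) (left : Int) : Int :=
  match min_left_search arr left 0 ((arr.length : Int) - 1) with
  | none => 0
  | some res => res

-- ===== PRECONDITION & SPEC =====
def Spec_min_left (arr : List Int) (left : Int) (out : Int) : Prop := out = min_left_alt arr left
instance (arr : List Int) (left : Int) (out : Int) : Decidable (Spec_min_left arr left out) := by unfold Spec_min_left; infer_instance

-- ===== CLAIM (what is proved, stated in full; the proofs are below) =====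
def Claim_equal_min_left : Prop := ∀ (arr : List Int) (left : Int), Dom_min_left arr left → Spec_min_left arr left (min_left arr left)

-- ===== LEMMAS AND PROOFS =====
lemma min_left_loop_eq_search (arr : List Int) (left : Int) :
    ∀ (n : Nat) (l r ans : Int), (r + 1 - l).toNat = n → 0 ≤ l → r < (arr.length : Int) →
    min_left_loop arr left l r ans = (min_left_search arr left l r).getD ans := by
  intro n
  induction n using Nat.strong_induction_on with
  | _ n ih =>
    intro l r ans hn hl hr
    rw [min_left_loop, min_left_search.eq_def]
    by_cases h : l ≤ r
    · simp only [dif_pos h]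
      have hb := PySem.Int.floordiv_two_mid_bounds h
      set mid := PySem.Int.floordiv (l + r) 2 with hm
      have hget : PySem.List.pyGet? arr mid = some (arr[mid.toNat]'(by omega)) := by
        have := PySem.List.pyGet?_eq_some_getElem (xs := arr) (i := mid) (by omega) (by omega)
        simpa using this
      rw [hget]
      simp only [ok_left, hget]
      by_cases hv : arr[mid.toNat]'(by omega) ≥ left
      · simp only [hv, decide_true, if_true]
        rw [ih (mid - 1 + 1 - l).toNat (by omega) l (mid - 1) mid rfl hl (by omega)]
        cases min_left_search arr left l (mid - 1) <;> simp
      · simp only [hv, decide_false, Bool.false_eq_true, if_false]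
        rw [ih (r + 1 - (mid + 1)).toNat (by omega) (mid + 1) r ans rfl (by omega) hr]
    · simp only [dif_neg h, Option.getD_none]

theorem min_left_eq_alt (arr : List Int) (left : Int) :
    min_left arr left = min_left_alt arr left := by
  unfold min_left min_left_alt
  rw [min_left_loop_eq_search arr left _ 0 ((arr.length : Int) - 1) 0 rfl (by omega) (by omega)]
  cases min_left_search arr left 0 ((arr.length : Int) - 1) <;> simp

-- ===== VERDICT (by name: the statement is the Claim_ definition above) =====
theorem min_left_spec : Claim_equal_min_left := by
  intro arr left _
  exact min_left_eq_alt arr left
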